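-- pv_equiv track=rewrite | github.com/yingl/LintCodeInPython | final-discounted-price.py | FinalDiscountedPrice
-- ===== SOURCE A (Python) =====
-- def FinalDiscountedPrice(prices):
--     # write your code here
--     r = [p for p in prices]
--     stack = []
--     for i in range(len(prices)):
--         while stack and (prices[stack[-1]] >= prices[i]):
--             idx = stack.pop()
--             r[idx] = prices[idx] - prices[i]
--         stack.append(i)
--     return r
-- ===== SOURCE B (Python) =====
-- def FinalDiscountedPrice(prices):
--     n = len(prices)
--     nxt = [n] * n  # nxt[i] = index of first j > i with prices[j] <= prices[i], else n
--     for i in range(n - 1, -1, -1):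
--         j = i + 1
--         while j < n and prices[j] > prices[i]:
--             j = nxt[j]
--         nxt[i] = j
--     return [prices[i] - prices[nxt[i]] if nxt[i] < n else prices[i] for i in range(n)]
-- ===== Notes on version B (the rewrite author's own statement) =====
-- stated objective: alternative
-- what changed: Replaced the left-to-right monotonic index stack with a right-to-left pass that builds a next-smaller-or-equal pointer array by pointer jumping (j = nxt[j]) and then reads the answers off it.
import Mathlib
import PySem

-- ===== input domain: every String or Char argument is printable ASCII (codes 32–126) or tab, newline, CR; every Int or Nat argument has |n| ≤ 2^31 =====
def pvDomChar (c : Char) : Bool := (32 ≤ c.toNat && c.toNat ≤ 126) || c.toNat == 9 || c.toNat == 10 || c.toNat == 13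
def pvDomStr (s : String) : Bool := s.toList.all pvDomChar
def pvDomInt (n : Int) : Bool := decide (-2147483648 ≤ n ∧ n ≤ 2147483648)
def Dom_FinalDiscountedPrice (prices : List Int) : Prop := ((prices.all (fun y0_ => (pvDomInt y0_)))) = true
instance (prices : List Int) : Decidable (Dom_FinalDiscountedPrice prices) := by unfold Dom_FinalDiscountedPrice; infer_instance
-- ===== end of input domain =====

-- B replaces A's left-to-right monotonic index stack with a right-to-left pass that builds a
-- next-smaller-or-equal pointer array by pointer jumping (alternative algorithm, similar cost).

-- ===== PORT A =====
-- the inner `while stack and prices[stack[-1]] >= prices[i]` loop; the stack is a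
-- head-first list of indices (Python appends/pops at the end = our head).
-- All indices pushed on the stack are < prices.length, so `getD`/`List.set` are exact.
def pvPop (prices : List Int) (pi : Int) (r : List Int) : List Nat → List Int × List Nat
  | [] => (r, [])
  | idx :: rest =>
    if prices.getD idx 0 ≥ pi then
      pvPop prices pi (r.set idx (prices.getD idx 0 - pi)) rest
    else (r, idx :: rest)

def pvStepA (prices : List Int) (st : List Int × List Nat) (i : Nat) : List Int × List Nat :=
  let st' := pvPop prices (prices.getD i 0) st.1 st.2
  (st'.1, i :: st'.2)

def FinalDiscountedPrice (prices : List Int) : List Int :=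
  ((List.range prices.length).foldl (pvStepA prices) (prices, [])).1

-- ===== PORT B =====
-- the inner `while j < n and prices[j] > prices[i]: j = nxt[j]` loop.  Python's loop
-- terminates because every stored pointer satisfies nxt[t] > t, so j strictly grows;
-- the fuel argument (called with n) only makes that same computation total and is
-- never exhausted (proved via pvJump_eq below).
def pvJump (prices : List Int) (pi : Int) (nxt : List Nat) : Nat → Nat → Nat
  | 0, j => j
  | fuel + 1, j =>
    if j < prices.length ∧ pi < prices.getD j 0 then
      pvJump prices pi nxt fuel (nxt.getD j 0)
    else j

-- `for i in range(n - 1, -1, -1): ... nxt[i] = j` (counts i down from n-1 to 0)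
def pvBuildNxt (prices : List Int) : Nat → List Nat → List Nat
  | 0, nxt => nxt
  | i + 1, nxt =>
    let j := pvJump prices (prices.getD i 0) nxt prices.length (i + 1)
    pvBuildNxt prices i (nxt.set i j)

-- the final list comprehension; all reads nxt[i], prices[...] are in range, so getD is exact
def FinalDiscountedPrice_alt (prices : List Int) : List Int :=
  let n := prices.length
  let nxt := pvBuildNxt prices n (List.replicate n n)
  (List.range n).map (fun i =>
    if nxt.getD i 0 < n then prices.getD i 0 - prices.getD (nxt.getD i 0) 0
    else prices.getD i 0)

-- ===== PRECONDITION & SPEC =====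
def Spec_FinalDiscountedPrice (prices : List Int) (out : List Int) : Prop := out = FinalDiscountedPrice_alt prices
instance (prices : List Int) (out : List Int) : Decidable (Spec_FinalDiscountedPrice prices out) := by unfold Spec_FinalDiscountedPrice; infer_instance

-- ===== CLAIM (what is proved, stated in full; the proofs are below) =====
def Claim_equal_FinalDiscountedPrice : Prop := ∀ (prices : List Int), Dom_FinalDiscountedPrice prices → Spec_FinalDiscountedPrice prices (FinalDiscountedPrice prices)

-- ===== LEMMAS AND PROOFS =====

-- reference value: first later price q ≤ p discounts p to p - q (proof-side only)
def pvScan (p : Int) : List Int → Int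
  | [] => p
  | q :: rest => if q ≤ p then p - q else pvScan p rest

def pvRefList (prices : List Int) : List Int :=
  (List.range prices.length).map (fun i => pvScan (prices.getD i 0) (prices.drop (i + 1)))


-- `unres prices idx k`: no price at a position in (idx, k) is ≤ prices[idx]
-- (index idx is still "unresolved" after A has processed indices < k).
def pvUnres (prices : List Int) (idx k : Nat) : Bool :=
  ((prices.take k).drop (idx + 1)).all (fun q => decide (prices.getD idx 0 < q))

-- the exact content of A's stack after processing indices < k (head = top of stack)
def pvStackOf (prices : List Int) (k : Nat) : List Nat :=
  (((List.range k).filter (fun idx => pvUnres prices idx k))).reverse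

lemma pvScan_append (p : Int) (l m : List Int) :
    pvScan p (l ++ m) =
      if l.all (fun q => decide (p < q)) then pvScan p m else pvScan p l := by
  induction l with
  | nil => simp
  | cons q l ih =>
    simp only [List.cons_append, pvScan, List.all_cons]
    by_cases h : q ≤ p
    · simp [h, show ¬ p < q by omega]
    · simp [h, show p < q by omega, ih]

lemma pvScan_all (p : Int) (l : List Int) (h : ∀ q ∈ l, p < q) : pvScan p l = p := by
  induction l with
  | nil => rfl
  | cons q l ih =>
    have hq := h q (List.mem_cons_self ..)
    simp only [pvScan, if_neg (by omega : ¬ q ≤ p)]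
    exact ih (fun q hq => h q (List.mem_cons_of_mem _ hq))

lemma pvMem_slice (prices : List Int) (a b k : Nat) (hab : a < b) (hbk : b < k)
    (hbn : b < prices.length) :
    prices.getD b 0 ∈ (prices.take k).drop (a + 1) := by
  have hlen : a + 1 + (b - (a + 1)) < ((prices.take k).length) := by
    simp [List.length_take]; omega
  have : ((prices.take k).drop (a + 1))[b - (a + 1)]'(by simp [List.length_drop, List.length_take]; omega) = prices.getD b 0 := by
    rw [List.getElem_drop]
    have hb' : a + 1 + (b - (a + 1)) = b := by omega
    simp [hb', List.getElem_take, List.getD_eq_getElem?_getD, List.getElem?_eq_getElem hbn]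
  exact this ▸ List.getElem_mem _
  
lemma pvUnres_forall (prices : List Int) (idx k : Nat) (h : pvUnres prices idx k = true) :
    ∀ q ∈ (prices.take k).drop (idx + 1), prices.getD idx 0 < q := by
  intro q hq
  have := List.all_eq_true.mp h q hq
  simpa using this

-- the stack is strictly decreasing in index and in price from head (top) to tail
lemma pvStack_pairwise (prices : List Int) (k : Nat) (hk : k ≤ prices.length) :
    (pvStackOf prices k).Pairwise
      (fun a b => b < a ∧ prices.getD b 0 < prices.getD a 0) := by
  unfold pvStackOf
  rw [List.pairwise_reverse]
  have h1 : ((List.range k).filter (fun idx => pvUnres prices idx k)).Pairwise (· < ·) :=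
    List.Pairwise.sublist List.filter_sublist List.pairwise_lt_range
  refine List.Pairwise.imp_of_mem ?_ h1
  intro a b ha hb hab
  refine ⟨hab, ?_⟩
  have hua : pvUnres prices a k = true := (List.mem_filter.mp ha).2
  have hbk : b < k := List.mem_range.mp (List.mem_filter.mp hb).1
  exact pvUnres_forall prices a k hua _ (pvMem_slice prices a b k hab hbk (by omega))

lemma pvStack_mem (prices : List Int) (k : Nat) (j : Nat) :
    j ∈ pvStackOf prices k ↔ j < k ∧ pvUnres prices j k = true := by
  unfold pvStackOf
  simp [List.mem_filter, List.mem_range]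

-- behaviour of the pop loop on a price-sorted stack of in-range indices
lemma pvPop_eq (prices : List Int) (pi : Int) (r : List Int) (stack : List Nat)
    (hlen : r.length = prices.length)
    (hmem : ∀ i ∈ stack, i < prices.length)
    (hsort : stack.Pairwise (fun a b => b < a ∧ prices.getD b 0 < prices.getD a 0)) :
    (pvPop prices pi r stack).2
        = stack.filter (fun idx => decide (prices.getD idx 0 < pi)) ∧
    (pvPop prices pi r stack).1.length = prices.length ∧
    ∀ j : Nat, (pvPop prices pi r stack).1.getD j 0 =
      if j ∈ stack ∧ pi ≤ prices.getD j 0 then prices.getD j 0 - pi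
      else r.getD j 0 := by
  induction stack generalizing r with
  | nil => exact ⟨rfl, hlen, fun j => by simp [pvPop]⟩
  | cons idx rest ih =>
    by_cases hcase : prices.getD idx 0 ≥ pi
    · have hstep : pvPop prices pi r (idx :: rest)
          = pvPop prices pi (r.set idx (prices.getD idx 0 - pi)) rest := by
        simp only [pvPop]; rw [if_pos hcase]
      have hidx : idx < prices.length := hmem idx (List.mem_cons_self ..)
      obtain ⟨h1, h2, h3⟩ := ih (r.set idx (prices.getD idx 0 - pi))
        (by simpa using hlen)
        (fun i hi => hmem i (List.mem_cons_of_mem _ hi))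
        (hsort.sublist (List.sublist_cons_self ..))
      refine ⟨?_, ?_, ?_⟩
      · rw [hstep, h1, List.filter_cons,
          if_neg (by simp only [decide_eq_true_eq]; omega)]
      · rw [hstep]; exact h2
      · intro j
        rw [hstep, h3 j]
        by_cases hj : j = idx
        · subst hj
          have hnot : j ∉ rest := fun h => by
            have := (List.pairwise_cons.mp hsort).1 j h
            omega
          rw [if_neg (by rintro ⟨h, -⟩; exact hnot h),
            if_pos ⟨List.mem_cons_self .., by omega⟩]
          simp [List.getD_eq_getElem?_getD,
            List.getElem?_set_self (by omega : j < r.length)]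
        · by_cases hjr : j ∈ rest ∧ pi ≤ prices.getD j 0
          · rw [if_pos hjr, if_pos ⟨List.mem_cons_of_mem _ hjr.1, hjr.2⟩]
          · have hmemiff : (j ∈ idx :: rest ∧ pi ≤ prices.getD j 0) ↔
                (j ∈ rest ∧ pi ≤ prices.getD j 0) := by
              constructor
              · rintro ⟨hm, hp⟩
                rcases List.mem_cons.mp hm with h | h
                · exact absurd h hj
                · exact ⟨h, hp⟩
              · rintro ⟨hm, hp⟩; exact ⟨List.mem_cons_of_mem _ hm, hp⟩
            rw [if_neg hjr, if_neg (fun h => hjr (hmemiff.mp h))]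
            simp [List.getD_eq_getElem?_getD, List.getElem?_set_ne (Ne.symm hj)]
    · have hstep : pvPop prices pi r (idx :: rest) = (r, idx :: rest) := by
        simp only [pvPop]; rw [if_neg hcase]
      have hrest : ∀ i ∈ rest, prices.getD i 0 < pi := by
        intro i hi
        have := (List.pairwise_cons.mp hsort).1 i hi
        omega
      refine ⟨?_, ?_, ?_⟩
      · rw [hstep, List.filter_cons,
          if_pos (by simp only [decide_eq_true_eq]; omega)]
        show idx :: rest = idx :: _
        congr 1
        exact (List.filter_eq_self.mpr
          (fun i hi => decide_eq_true (hrest i hi))).symm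
      · rw [hstep]; exact hlen
      · intro j
        rw [hstep]
        rw [if_neg]
        rintro ⟨hm, hp⟩
        rcases List.mem_cons.mp hm with h | h
        · subst h; omega
        · have := hrest j h; omega

lemma pvTake_succ (prices : List Int) (k : Nat) (hk : k < prices.length) :
    prices.take (k + 1) = prices.take k ++ [prices.getD k 0] := by
  rw [List.take_add_one]
  simp [List.getElem?_eq_getElem hk, List.getD_eq_getElem?_getD]

lemma pvSlice_succ (prices : List Int) (j k : Nat) (hj : j < k) (hk : k < prices.length) :
    (prices.take (k + 1)).drop (j + 1)
      = (prices.take k).drop (j + 1) ++ [prices.getD k 0] := by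
  rw [pvTake_succ prices k hk, List.drop_append_of_le_length]
  simp [List.length_take]; omega

lemma pvSlice_hi_empty (prices : List Int) (j k : Nat) (hj : k ≤ j + 1) :
    (prices.take k).drop (j + 1) = [] := by
  apply List.drop_eq_nil_of_le
  simp [List.length_take]; omega

-- main loop invariant of A's fold
lemma pvLoop_inv (prices : List Int) (k : Nat) (hk : k ≤ prices.length) :
    ((List.range k).foldl (pvStepA prices) (prices, [])).2 = pvStackOf prices k ∧
    ((List.range k).foldl (pvStepA prices) (prices, [])).1.length = prices.length ∧
    ∀ j : Nat, ((List.range k).foldl (pvStepA prices) (prices, [])).1.getD j 0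
      = pvScan (prices.getD j 0) ((prices.take k).drop (j + 1)) := by
  induction k with
  | zero =>
    refine ⟨by simp [pvStackOf], by simp, ?_⟩
    intro j
    simp [pvScan]
  | succ k ih =>
    have hk' : k < prices.length := by omega
    obtain ⟨ih1, ih2, ih3⟩ := ih (by omega)
    rw [List.range_succ, List.foldl_append, List.foldl_cons, List.foldl_nil]
    set st := (List.range k).foldl (pvStepA prices) (prices, []) with hst
    set pi := prices.getD k 0 with hpi
    have hmem : ∀ i ∈ st.2, i < prices.length := by
      rw [ih1]; intro i hi
      have := (pvStack_mem prices k i).mp hi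
      omega
    have hsort := ih1 ▸ pvStack_pairwise prices k (by omega)
    obtain ⟨hp1, hp2, hp3⟩ := pvPop_eq prices pi st.1 st.2 ih2 hmem (ih1 ▸ pvStack_pairwise prices k (by omega))
    refine ⟨?_, ?_, ?_⟩
    · -- stack shape
      show k :: (pvPop prices pi st.1 st.2).2 = pvStackOf prices (k + 1)
      rw [hp1, ih1]
      unfold pvStackOf
      rw [List.range_succ, List.filter_append, List.filter_cons]
      have hunk : pvUnres prices k (k + 1) = true := by
        unfold pvUnres
        rw [pvSlice_hi_empty prices k (k+1) (by omega)]
        rfl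
      simp only [hunk, List.filter_nil, List.reverse_append]
      congr 1
      rw [List.filter_reverse]
      congr 1
      rw [List.filter_filter]
      apply List.filter_congr
      intro idx hidx
      have hidxk : idx < k := List.mem_range.mp hidx
      unfold pvUnres
      rw [pvSlice_succ prices idx k hidxk hk', List.all_append]
      simp [hpi, Bool.and_comm]
    · exact hp2
    · intro j
      show (pvPop prices pi st.1 st.2).1.getD j 0 = _
      rw [hp3 j, ih3 j, ih1]
      by_cases hjk : k ≤ j
      · -- slice at k+1 still empty; j not in the stack
        rw [pvSlice_hi_empty prices j k (by omega),
            pvSlice_hi_empty prices j (k+1) (by omega)]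
        rw [if_neg]
        rintro ⟨hm, _⟩
        have := (pvStack_mem prices k j).mp hm
        omega
      · replace hjk : j < k := by omega
        rw [pvSlice_succ prices j k hjk hk', ← hpi]
        rw [pvScan_append]
        by_cases hu : pvUnres prices j k = true
        · -- j unresolved before step k
          have hall : ((prices.take k).drop (j+1)).all (fun q => decide (prices.getD j 0 < q)) = true := hu
          rw [if_pos hall]
          have hjmem : j ∈ pvStackOf prices k := (pvStack_mem prices k j).mpr ⟨hjk, hu⟩
          by_cases hle : pi ≤ prices.getD j 0
          · rw [if_pos ⟨hjmem, hle⟩]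
            simp only [pvScan]
            rw [if_pos hle]
          · rw [if_neg (by rintro ⟨_, h⟩; exact hle h)]
            rw [pvScan_all _ _ (pvUnres_forall prices j k hu)]
            simp only [pvScan]
            rw [if_neg hle]
        · -- j already resolved: appending prices[k] changes nothing
          have hall : ¬ ((prices.take k).drop (j+1)).all (fun q => decide (prices.getD j 0 < q)) = true := hu
          rw [if_neg hall, if_neg]
          rintro ⟨hm, _⟩
          exact hu ((pvStack_mem prices k j).mp hm).2

-- A's fold equals the reference list
lemma pvA_eq_ref (prices : List Int) : FinalDiscountedPrice prices = pvRefList prices := by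
  unfold FinalDiscountedPrice pvRefList
  obtain ⟨-, h2, h3⟩ := pvLoop_inv prices prices.length le_rfl
  apply List.ext_getElem
  · simp [h2]
  · intro j hj1 hj2
    have hjlt : j < prices.length := by simpa [h2] using hj1
    have := h3 j
    rw [List.take_length] at this
    rw [List.getElem_map, List.getElem_range]
    rw [← List.getD_eq_getElem _ 0 hj1, this]

-- first index t ≥ j with prices[t] ≤ pi (or prices.length if none)
def pvFind (prices : List Int) (pi : Int) (j : Nat) : Nat :=
  if h : j < prices.length then
    (if prices.getD j 0 ≤ pi then j else pvFind prices pi (j + 1))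
  else j
termination_by prices.length - j
decreasing_by omega

lemma pvFind_ge (prices : List Int) (pi : Int) (j : Nat) : j ≤ pvFind prices pi j := by
  fun_induction pvFind with
  | case1 => omega
  | case2 j h hle ih => omega
  | case3 => omega

lemma pvFind_le (prices : List Int) (pi : Int) (j : Nat) (hj : j ≤ prices.length) :
    pvFind prices pi j ≤ prices.length := by
  fun_induction pvFind with
  | case1 => omega
  | case2 j h hle ih => exact ih (by omega)
  | case3 => omega

lemma pvFind_gt (prices : List Int) (pi : Int) (j : Nat) :
    ∀ t, j ≤ t → t < pvFind prices pi j → pi < prices.getD t 0 := by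
  fun_induction pvFind with
  | case1 j h hle => omega
  | case2 j h hle ih =>
    intro t ht1 ht2
    rcases Nat.eq_or_lt_of_le ht1 with rfl | h'
    · omega
    · exact ih t h' ht2
  | case3 j h => omega

lemma pvFind_skip (prices : List Int) (pi : Int) (j m : Nat) (hjm : j ≤ m)
    (hmn : m ≤ prices.length) (hgt : ∀ t, j ≤ t → t < m → pi < prices.getD t 0) :
    pvFind prices pi j = pvFind prices pi m := by
  induction m with
  | zero =>
    have : j = 0 := by omega
    simp [this]
  | succ m ih =>
    rcases Nat.eq_or_lt_of_le hjm with rfl | h'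
    · rfl
    · have hjm' : j ≤ m := by omega
      rw [ih hjm' (by omega) (fun t ht1 ht2 => hgt t ht1 (by omega))]
      have hm : m < prices.length := by omega
      rw [pvFind, dif_pos hm, if_neg (by have := hgt m hjm' (by omega); omega)]

lemma pvScan_drop (prices : List Int) (pi : Int) (j : Nat) (hj : j ≤ prices.length) :
    pvScan pi (prices.drop j) =
      if pvFind prices pi j < prices.length
      then pi - prices.getD (pvFind prices pi j) 0 else pi := by
  fun_induction pvFind prices pi j with
  | case1 j h hle =>
    rw [List.drop_eq_getElem_cons h]
    simp only [pvScan]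
    rw [if_pos (by rwa [List.getD_eq_getElem _ 0 h] at hle), if_pos h,
      List.getD_eq_getElem _ 0 h]
  | case2 j h hle ih =>
    rw [List.drop_eq_getElem_cons h]
    simp only [pvScan]
    rw [if_neg (by rwa [List.getD_eq_getElem _ 0 h] at hle), ih (by omega)]
  | case3 j h =>
    rw [List.drop_eq_nil_of_le (by omega)]
    rw [if_neg (by omega)]
    rfl

-- the fuelled jump loop computes pvFind whenever the stored pointers are correct
lemma pvJump_eq (prices : List Int) (nxt : List Nat) (lo : Nat)
    (hnxt : ∀ t, lo ≤ t → t < prices.length →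
      nxt.getD t 0 = pvFind prices (prices.getD t 0) (t + 1)) :
    ∀ (fuel j : Nat) (pi : Int), j ≤ prices.length → prices.length ≤ fuel + j → lo ≤ j →
      pvJump prices pi nxt fuel j = pvFind prices pi j := by
  intro fuel
  induction fuel with
  | zero =>
    intro j pi hj hfuel hlo
    have : j = prices.length := by omega
    subst this
    simp only [pvJump]
    rw [pvFind, dif_neg (by omega)]
  | succ fuel ih =>
    intro j pi hj hfuel hlo
    simp only [pvJump]
    by_cases hc : j < prices.length ∧ pi < prices.getD j 0
    · rw [if_pos hc, hnxt j hlo hc.1]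
      set m := pvFind prices (prices.getD j 0) (j + 1) with hm
      have hm1 : j + 1 ≤ m := pvFind_ge ..
      have hm2 : m ≤ prices.length := pvFind_le _ _ _ (by omega)
      rw [ih m pi hm2 (by omega) (by omega)]
      exact (pvFind_skip prices pi j m (by omega) hm2 (fun t ht1 ht2 => by
        rcases Nat.eq_or_lt_of_le ht1 with rfl | h'
        · exact hc.2
        · have := pvFind_gt prices (prices.getD j 0) (j + 1) t h' ht2
          exact lt_trans hc.2 this)).symm
    · rw [if_neg hc]
      rcases Nat.lt_or_ge j prices.length with h | h
      · have hle : prices.getD j 0 ≤ pi := by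
          rcases not_and_or.mp hc with h' | h'
          · omega
          · omega
        rw [pvFind, dif_pos h, if_pos hle]
      · have : j = prices.length := by omega
        subst this
        rw [pvFind, dif_neg (by omega)]

-- the downward build loop fills nxt with pvFind values
lemma pvBuild_correct (prices : List Int) :
    ∀ (i : Nat) (nxt : List Nat), nxt.length = prices.length → i ≤ prices.length →
      (∀ t, i ≤ t → t < prices.length →
        nxt.getD t 0 = pvFind prices (prices.getD t 0) (t + 1)) →
      ∀ t, t < prices.length →
        (pvBuildNxt prices i nxt).getD t 0 = pvFind prices (prices.getD t 0) (t + 1) := by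
  intro i
  induction i with
  | zero =>
    intro nxt hlen hi hcorr t ht
    simpa [pvBuildNxt] using hcorr t (by omega) ht
  | succ i ih =>
    intro nxt hlen hi hcorr t ht
    simp only [pvBuildNxt]
    have hj : pvJump prices (prices.getD i 0) nxt prices.length (i + 1)
        = pvFind prices (prices.getD i 0) (i + 1) :=
      pvJump_eq prices nxt (i + 1)
        (fun t ht1 ht2 => hcorr t (by omega) ht2)
        prices.length (i + 1) _ (by omega) (by omega) le_rfl
    rw [hj]
    refine ih _ (by simpa using hlen) (by omega) ?_ t ht
    intro t' ht1 ht2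
    rcases Nat.eq_or_lt_of_le ht1 with rfl | h'
    · rw [List.getD_eq_getElem?_getD, List.getElem?_set_self (by omega)]
      rfl
    · rw [List.getD_eq_getElem?_getD, List.getElem?_set_ne (by omega)]
      exact hcorr t' (by omega) ht2

-- B's pointer array reproduces the reference list
lemma pvB_eq_ref (prices : List Int) : FinalDiscountedPrice_alt prices = pvRefList prices := by
  unfold FinalDiscountedPrice_alt pvRefList
  apply List.map_congr_left
  intro i hi
  have hi' : i < prices.length := List.mem_range.mp hi
  have hN : (pvBuildNxt prices prices.length (List.replicate prices.length prices.length)).getD i 0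
      = pvFind prices (prices.getD i 0) (i + 1) :=
    pvBuild_correct prices prices.length _ (by simp) le_rfl (by omega) i hi'
  rw [hN, pvScan_drop prices (prices.getD i 0) (i + 1) (by omega)]

-- ===== VERDICT (by name: the statement is the Claim_ definition above) =====
theorem FinalDiscountedPrice_spec : Claim_equal_FinalDiscountedPrice := by
  intro prices _
  unfold Spec_FinalDiscountedPrice
  rw [pvA_eq_ref, pvB_eq_ref]
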